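-- pv_equiv track=rewrite | github.com/himinqq/algorithm_py | best_album.py | solution
-- ===== SOURCE A (Python) =====
-- from collections import defaultdict
--
-- def solution(genres, plays):
--     answer = []
--     # 많이 재생된 장르 > 많이 재생된 노래 > 고유번호 낮은 순서대로 정렬
--     songs = defaultdict(list)
--     # 장르: [고유번호,재생횟수]
--     for idx, g in enumerate(genres):
--         songs[g].append([idx,plays[idx]])
--
--
--     g_sort = []
--     for k,v in songs.items():
--         play_cnt = sum(map(lambda x:x[1],v))
--         g_sort.append([k,play_cnt])
--     g_sort.sort(key=lambda x:x[1],reverse=True)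
--
--     for genre,_ in g_sort:
--         song_list = songs[genre]
--         song_list.sort(key=lambda x:(-x[1],x[0]))
--         answer.extend([num for num,cnt in song_list])
--
--     return answer
-- ===== SOURCE B (Python) =====
-- def solution(genres, plays):
--     # one global sort keyed by (genre rank, -plays, index) instead of per-genre bucket sorting
--     totals = {}
--     for g, p in zip(genres, plays):
--         totals[g] = totals.get(g, 0) + p
--     order = sorted(totals, key=lambda g: -totals[g])
--     rank = {g: r for r, g in enumerate(order)}
--     return sorted(range(len(genres)), key=lambda i: (rank[genres[i]], -plays[i], i))
-- ===== Notes on version B (the rewrite author's own statement) =====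
-- stated objective: simpler
-- what changed: A buckets songs per genre in a defaultdict, sorts each bucket by (-plays, index) and extends the answer genre by genre in order of total plays; B does one pass to sum plays per genre, ranks the genres, and returns a single global sort of the indices keyed by (genre rank, -plays, index).
import Mathlib
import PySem

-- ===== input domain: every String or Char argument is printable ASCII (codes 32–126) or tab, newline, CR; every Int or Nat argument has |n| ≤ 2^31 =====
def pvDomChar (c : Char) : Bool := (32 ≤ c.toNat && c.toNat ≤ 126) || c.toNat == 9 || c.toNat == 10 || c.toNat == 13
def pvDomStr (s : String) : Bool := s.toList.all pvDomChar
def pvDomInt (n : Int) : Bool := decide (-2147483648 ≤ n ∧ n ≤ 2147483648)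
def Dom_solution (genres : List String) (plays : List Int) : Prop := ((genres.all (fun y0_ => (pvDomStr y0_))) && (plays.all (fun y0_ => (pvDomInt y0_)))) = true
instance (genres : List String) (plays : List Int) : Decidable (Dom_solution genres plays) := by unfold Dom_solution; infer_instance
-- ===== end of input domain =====

-- B replaces A's per-genre bucket sort + extend with one global sort of the indices keyed by
-- (genre rank, -plays, index); equivalence of return values is proved on inputs with
-- len(genres) <= len(plays) (elsewhere A raises IndexError).

-- ===== PORT A =====
def solution (genres : List String) (plays : List Int) : List Int :=
  -- songs = defaultdict(list); for idx, g in enumerate(genres): songs[g].append([idx, plays[idx]])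
  let songs : PySem.Dict String (List (Int × Int)) :=
    (PySem.List.enumerate genres).foldl
      (fun d ig => d.modify ig.2 [] (fun v => v ++ [(ig.1, PySem.List.pyGetD plays ig.1 0)]))
      PySem.Dict.empty
  -- g_sort = []; for k,v in songs.items(): g_sort.append([k, sum of plays]); g_sort.sort(key=x[1], reverse=True)
  let gsort0 : List (String × Int) :=
    songs.items.foldl (fun acc kv => acc ++ [(kv.1, (kv.2.map (fun x => x.2)).sum)]) []
  let gsort := PySem.List.sorted gsort0 (fun x => x.2) true
  -- for genre,_ in g_sort: song_list.sort(key=(-x[1],x[0])); answer.extend(nums)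
  gsort.foldl
    (fun answer kt =>
      let songList := PySem.List.sorted2 (songs.getD kt.1 []) (fun x => -x.2) (fun x => x.1) false
      answer ++ songList.map (fun x => x.1))
    []

-- ===== PORT B =====
def solution_alt (genres : List String) (plays : List Int) : List Int :=
  -- totals[g] = totals.get(g, 0) + p  over zip(genres, plays)
  let totals : PySem.Dict String Int :=
    (genres.zip plays).foldl (fun d gp => d.insert gp.1 (d.getD gp.1 0 + gp.2)) PySem.Dict.empty
  -- order = sorted(totals, key=lambda g: -totals[g])
  let order := PySem.List.sorted totals.keys (fun c => -(totals.getD c 0)) false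
  -- rank = {g: r for r, g in enumerate(order)}
  let rank : PySem.Dict String Int :=
    (PySem.List.enumerate order).foldl (fun d rg => d.insert rg.2 rg.1) PySem.Dict.empty
  -- sorted(range(len(genres)), key=lambda i: (rank[genres[i]], -plays[i], i))  (tuple key = lexicographic)
  PySem.List.sorted2 (PySem.List.pyRange 0 (genres.length : Int))
    (fun i => (rank.getD (PySem.List.pyGetD genres i "") 0 : Int))
    (fun i => toLex ((-(PySem.List.pyGetD plays i 0) : Int), i))
    false

-- ===== PRECONDITION & SPEC =====
-- A evaluates plays[idx] for every idx below len(genres): when len(plays) < len(genres) it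
-- raises IndexError (and B raises too), so Pre_ requires len(genres) <= len(plays).
def Pre_solution (genres : List String) (plays : List Int) : Prop :=
  genres.length ≤ plays.length
instance (genres : List String) (plays : List Int) : Decidable (Pre_solution genres plays) := by
  unfold Pre_solution; infer_instance
def pvWitness_solution : List String × List Int := (["pop", "rock", "pop", "rock"], [600, 150, 450, 800])

def Spec_solution (genres : List String) (plays : List Int) (out : List Int) : Prop := out = solution_alt genres plays
instance (genres : List String) (plays : List Int) (out : List Int) : Decidable (Spec_solution genres plays out) := by unfold Spec_solution; infer_instance

-- ===== CLAIM (what is proved, stated in full; the proofs are below) =====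
def Claim_equal_solution : Prop := ∀ (genres : List String) (plays : List Int), Dom_solution genres plays → Pre_solution genres plays → Spec_solution genres plays (solution genres plays)

-- ===== LEMMAS AND PROOFS =====

-- Abbreviations used only by the proofs.
def pvG (genres : List String) (j : Int) : String := PySem.List.pyGetD genres j ""
def pvP (plays : List Int) (j : Int) : Int := PySem.List.pyGetD plays j 0
def pvJ (genres : List String) : List Int := PySem.List.pyRange 0 (genres.length : Int)
def pvGrp (genres : List String) (c : String) : List Int :=
  (pvJ genres).filter (fun j => pvG genres j == c)
def pvTot (genres : List String) (plays : List Int) (c : String) : Int :=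
  ((pvGrp genres c).map (pvP plays)).sum
def pvOrd (genres : List String) (plays : List Int) : List String :=
  PySem.List.sorted (PySem.Set.ofList genres) (fun c => -(pvTot genres plays c)) false
def pvRank (genres : List String) (plays : List Int) : PySem.Dict String Int :=
  (PySem.List.enumerate (pvOrd genres plays)).foldl (fun d rg => d.insert rg.2 rg.1) PySem.Dict.empty
def pvKey (genres : List String) (plays : List Int) (i : Int) : Lex (Int × Lex (Int × Int)) :=
  toLex (((pvRank genres plays).getD (pvG genres i) 0 : Int), toLex ((-(pvP plays i) : Int), i))
def pvInner (genres : List String) (plays : List Int) (c : String) : List Int :=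
  PySem.List.sorted (pvGrp genres c) (fun j => toLex ((-(pvP plays j) : Int), j)) false

-- reverse=True sort by key = forward sort by negated key
lemma sorted_rev_neg {α : Type} (key : α → Int) (xs : List α) :
    PySem.List.sorted xs key true = PySem.List.sorted xs (fun x => -(key x)) false := by
  simp only [PySem.List.sorted]
  congr 1
  funext acc x
  congr 1
  funext a b
  simp only [if_true, if_neg (Bool.false_ne_true), decide_eq_decide]
  omega

-- a two-key Python sort is a one-key sort by the lexicographic pair
lemma sorted2_eq_sorted_lex {α κ₂ : Type} [LinearOrder κ₂] (k1 : α → Int) (k2 : α → κ₂) (xs : List α) :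
    PySem.List.sorted2 xs k1 k2 false = PySem.List.sorted xs (fun x => toLex (k1 x, k2 x)) false := by
  simp only [PySem.List.sorted2, PySem.List.sorted]
  congr 1
  funext acc x
  congr 1
  funext a b
  simp only [if_neg (Bool.false_ne_true)]
  have h : (toLex (k1 a, k2 a) < toLex (k1 b, k2 b)) ↔ (k1 a < k1 b ∨ (¬ k1 b < k1 a ∧ k2 a < k2 b)) := by
    rw [Prod.Lex.toLex_lt_toLex]
    constructor
    · rintro (h1 | ⟨h1, h2⟩)
      · exact Or.inl h1
      · exact Or.inr ⟨by omega, h2⟩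
    · rintro (h1 | ⟨h1, h2⟩)
      · exact Or.inl h1
      · rcases lt_or_ge (k1 a) (k1 b) with hl | hl
        · exact Or.inl hl
        · exact Or.inr ⟨by omega, h2⟩
  by_cases h1 : k1 a < k1 b <;> by_cases h2 : k1 b < k1 a <;> by_cases h3 : k2 a < k2 b <;>
    simp [h1, h2, h3, h]

lemma insertBy_map {α β : Type} (bf : β → β → Bool) (bg : α → α → Bool) (f : α → β)
    (h : ∀ a b, bf (f a) (f b) = bg a b) (x : α) (ys : List α) :
    PySem.List.insertBy bf (f x) (ys.map f) = (PySem.List.insertBy bg x ys).map f := by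
  induction ys with
  | nil => rfl
  | cons y t ih =>
      simp only [List.map_cons, PySem.List.insertBy, h]
      by_cases hb : bg x y
      · simp [hb]
      · simp [hb, ih]

lemma foldl_insertBy_map {α β : Type} (bf : β → β → Bool) (bg : α → α → Bool) (f : α → β)
    (h : ∀ a b, bf (f a) (f b) = bg a b) (xs ys : List α) :
    (xs.map f).foldl (fun acc x => PySem.List.insertBy bf x acc) (ys.map f)
      = (xs.foldl (fun acc x => PySem.List.insertBy bg x acc) ys).map f := by
  rw [List.foldl_map]
  induction xs generalizing ys with
  | nil => rfl
  | cons x t ih =>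
      simp only [List.foldl_cons]
      rw [insertBy_map bf bg f h x ys, ih]

lemma sorted_map {α β κ : Type} [LT κ] [DecidableLT κ] (f : α → β) (key : β → κ)
    (xs : List α) (rev : Bool) :
    PySem.List.sorted (xs.map f) key rev = (PySem.List.sorted xs (fun x => key (f x)) rev).map f := by
  simp only [PySem.List.sorted]
  cases rev <;> exact foldl_insertBy_map _ _ f (fun a b => rfl) xs []

-- getD after the totals-building fold
lemma getD_foldl_insert_add (l : List (String × Int)) (d : PySem.Dict String Int) (c : String) :
    (l.foldl (fun d gp => d.insert gp.1 (d.getD gp.1 0 + gp.2)) d).getD c 0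
      = d.getD c 0 + ((l.filter (fun gp => gp.1 == c)).map (fun gp => gp.2)).sum := by
  induction l generalizing d with
  | nil => simp
  | cons gp t ih =>
      simp only [List.foldl_cons, ih, List.filter_cons]
      by_cases hc : gp.1 = c
      · subst hc
        simp
        ring
      · rw [PySem.Dict.getD_insert_of_ne _ _ _ (Ne.symm hc)]
        simp [hc]

-- rank-dict lookups: getD of the fold over enumerate gives the position
lemma rank_fold_preserve (l : List (Int × String)) (d : PySem.Dict String Int) (c : String)
    (h : ∀ q ∈ l, q.2 ≠ c) :
    (l.foldl (fun d rg => d.insert rg.2 rg.1) d).getD c 0 = d.getD c 0 := by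
  induction l generalizing d with
  | nil => rfl
  | cons q t ih =>
      simp only [List.foldl_cons]
      rw [ih _ (fun q hq => h q (List.mem_cons_of_mem _ hq)),
          PySem.Dict.getD_insert_of_ne _ _ _ (Ne.symm (h q (List.mem_cons_self)))]

lemma rank_fold_getD (os : List String) (hnd : os.Nodup) (s : Int) (d : PySem.Dict String Int)
    (k : Nat) (hk : k < os.length) :
    ((PySem.List.enumerate os s).foldl (fun d rg => d.insert rg.2 rg.1) d).getD os[k] 0 = s + k := by
  induction os generalizing s d k with
  | nil => simp at hk
  | cons c t ih =>
      rw [PySem.List.enumerate_cons, List.foldl_cons]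
      rcases k with _ | k
      · have hcnot : c ∉ t := (List.nodup_cons.mp hnd).1
        rw [List.getElem_cons_zero, rank_fold_preserve, PySem.Dict.getD_insert]
        · simp
        · intro q hq
          rw [PySem.List.mem_enumerate_iff] at hq
          obtain ⟨m, hm, rfl⟩ := hq
          intro hqc
          exact hcnot (hqc ▸ List.getElem_mem hm)
      · rw [List.getElem_cons_succ, ih (List.nodup_cons.mp hnd).2 (s + 1) _ k (by simpa using hk)]
        push_cast; ring

-- the zip A-loop and the enumerate view of the index list (requires Pre_)
lemma zip_eq_map (genres : List String) (plays : List Int) (h : genres.length ≤ plays.length) :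
    genres.zip plays = (pvJ genres).map (fun j => (pvG genres j, pvP plays j)) := by
  have hJ : pvJ genres = (List.range genres.length).map (fun (k : Nat) => (k : Int)) := by
    rw [pvJ]; exact PySem.List.pyRange_zero_natCast genres.length
  rw [hJ, List.map_map]
  apply List.ext_getElem
  · simp only [List.length_zip, List.length_map, List.length_range]
    omega
  · intro k h1 h2
    simp only [List.getElem_zip, List.getElem_map, List.getElem_range, Function.comp_apply]
    have hk : k < genres.length := by
      simpa only [List.length_map, List.length_range] using h2
    have e1 : pvG genres (k : Int) = genres[k] := by
      rw [pvG, PySem.List.pyGetD_eq_getElem genres "" (by positivity) (by exact_mod_cast hk)]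
      simp
    have e2 : pvP plays (k : Int) = plays[k]'(lt_of_lt_of_le hk h) := by
      rw [pvP, PySem.List.pyGetD_eq_getElem plays 0 (by positivity) (by exact_mod_cast (lt_of_lt_of_le hk h))]
      simp
    simp [e1, e2]

lemma enumerate_eq_map (genres : List String) :
    PySem.List.enumerate genres = (pvJ genres).map (fun j => (j, pvG genres j)) := by
  simpa [pvJ, pvG, PySem.List.len] using PySem.List.enumerate_eq_map_pyRange genres ""

lemma nodup_pvJ (genres : List String) : (pvJ genres).Nodup := by
  have hJ : pvJ genres = (List.range genres.length).map (fun (k : Nat) => (k : Int)) := by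
    rw [pvJ]; exact PySem.List.pyRange_zero_natCast genres.length
  rw [hJ]
  exact (List.nodup_range).map (fun a b => by exact_mod_cast id)

lemma mem_genres_of_mem_pvJ (genres : List String) (v : Int) (hv : v ∈ pvJ genres) :
    pvG genres v ∈ genres := by
  rw [pvJ, PySem.List.mem_pyRange_one] at hv
  rw [pvG, PySem.List.pyGetD_eq_getElem genres "" hv.1 hv.2]
  exact List.getElem_mem _

-- A unfolded (holds unconditionally)
lemma solution_eq_flatMap (genres : List String) (plays : List Int) :
    solution genres plays = (pvOrd genres plays).flatMap (pvInner genres plays) := by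
  have hkeysA : ((PySem.List.enumerate genres).foldl
      (fun d ig => d.modify ig.2 [] (fun v => v ++ [(ig.1, PySem.List.pyGetD plays ig.1 0)]))
      PySem.Dict.empty).keys = PySem.Set.ofList genres := by
    rw [PySem.Dict.keys_foldl_modify_key (PySem.List.enumerate genres) (fun ig => ig.2) []
        (fun d ig => fun v => v ++ [(ig.1, PySem.List.pyGetD plays ig.1 0)]) PySem.Dict.empty]
    rw [PySem.Dict.keys_empty, PySem.Set.update_nil_left, PySem.List.map_snd_enumerate]
  have hnodupA : ((PySem.List.enumerate genres).foldl
      (fun d ig => d.modify ig.2 [] (fun v => v ++ [(ig.1, PySem.List.pyGetD plays ig.1 0)]))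
      PySem.Dict.empty).keys.Nodup := by
    rw [hkeysA]
    exact PySem.Set.nodup_ofList genres
  have hgetDA : ∀ c, ((PySem.List.enumerate genres).foldl
      (fun d ig => d.modify ig.2 [] (fun v => v ++ [(ig.1, PySem.List.pyGetD plays ig.1 0)]))
      PySem.Dict.empty).getD c []
      = (pvGrp genres c).map (fun j => (j, pvP plays j)) := by
    intro c
    rw [show ((PySem.List.enumerate genres).foldl
        (fun d ig => d.modify ig.2 [] (fun v => v ++ [(ig.1, PySem.List.pyGetD plays ig.1 0)]))
        PySem.Dict.empty)
      = (((PySem.List.enumerate genres).map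
            (fun ig => (ig.2, (ig.1, PySem.List.pyGetD plays ig.1 0)))).foldl
          (fun d p => d.modify p.1 [] (fun v => v ++ [p.2])) PySem.Dict.empty) from
      (List.foldl_map (f := fun ig => (ig.2, (ig.1, PySem.List.pyGetD plays ig.1 0)))
        (g := fun d p => d.modify p.1 [] (fun v => v ++ [p.2]))
        (l := PySem.List.enumerate genres) (init := PySem.Dict.empty)).symm]
    rw [PySem.Dict.getD_foldl_modify_append, List.filter_map, List.map_map,
        enumerate_eq_map genres, List.filter_map, List.map_map]
    simp [pvGrp, pvP, Function.comp_def]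
  have hitems : ((PySem.List.enumerate genres).foldl
      (fun d ig => d.modify ig.2 [] (fun v => v ++ [(ig.1, PySem.List.pyGetD plays ig.1 0)]))
      PySem.Dict.empty).items
      = (PySem.Set.ofList genres).map
          (fun c => (c, (pvGrp genres c).map (fun j => (j, pvP plays j)))) := by
    rw [PySem.Dict.items_eq_map_keys _ hnodupA [], hkeysA]
    exact List.map_congr_left (fun c _ => by rw [hgetDA])
  simp only [solution]
  rw [PySem.List.foldl_append_singleton_eq_map, List.nil_append, hitems, List.map_map]
  have hgsort0 : (PySem.Set.ofList genres).map
        ((fun kv => (kv.1, ((kv.2.map (fun x => x.2)).sum : Int))) ∘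
          (fun c => (c, (pvGrp genres c).map (fun j => (j, pvP plays j)))))
      = (PySem.Set.ofList genres).map (fun c => (c, pvTot genres plays c)) := by
    apply List.map_congr_left
    intro c _
    simp [pvTot, Function.comp_def, List.map_map]
  rw [hgsort0,
      sorted_rev_neg (α := String × Int) (fun x => x.2)
        ((PySem.Set.ofList genres).map (fun c => (c, pvTot genres plays c))),
      sorted_map (fun c => (c, pvTot genres plays c))
        (fun x : String × Int => -(x.2)) (PySem.Set.ofList genres) false]
  rw [show PySem.List.sorted (PySem.Set.ofList genres)
        (fun c => -(((fun c => (c, pvTot genres plays c)) c).2)) false = pvOrd genres plays from rfl]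
  rw [PySem.List.foldl_append_eq_flatMap, List.nil_append, List.flatMap_map]
  congr 1
  funext c
  rw [hgetDA c, sorted2_eq_sorted_lex (fun x : Int × Int => -x.2) (fun x : Int × Int => x.1)
        ((pvGrp genres c).map (fun j => (j, pvP plays j))),
      sorted_map (fun j => (j, pvP plays j))
        (fun x : Int × Int => toLex ((-x.2 : Int), x.1)) (pvGrp genres c) false,
      List.map_map]
  simp [pvInner, Function.comp_def]

-- B unfolded (requires Pre_)
lemma solution_alt_eq (genres : List String) (plays : List Int)
    (h : genres.length ≤ plays.length) :
    solution_alt genres plays = PySem.List.sorted (pvJ genres) (pvKey genres plays) false := by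
  have hkeys : ((genres.zip plays).foldl (fun d gp => d.insert gp.1 (d.getD gp.1 0 + gp.2))
      PySem.Dict.empty).keys = PySem.Set.ofList genres := by
    rw [PySem.Dict.keys_foldl_insert_key (genres.zip plays) (fun gp => gp.1)
        (fun d gp => d.getD gp.1 0 + gp.2) PySem.Dict.empty]
    rw [PySem.Dict.keys_empty, PySem.Set.update_nil_left]
    congr 1
    exact List.map_fst_zip h
  have hgetD : ∀ c, ((genres.zip plays).foldl (fun d gp => d.insert gp.1 (d.getD gp.1 0 + gp.2))
      PySem.Dict.empty).getD c 0 = pvTot genres plays c := by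
    intro c
    rw [getD_foldl_insert_add, zip_eq_map genres plays h, List.filter_map, List.map_map, pvTot]
    simp [pvGrp, Function.comp_def]
  have hord : PySem.List.sorted ((genres.zip plays).foldl
        (fun d gp => d.insert gp.1 (d.getD gp.1 0 + gp.2)) PySem.Dict.empty).keys
        (fun c => -(((genres.zip plays).foldl (fun d gp => d.insert gp.1 (d.getD gp.1 0 + gp.2))
          PySem.Dict.empty).getD c 0)) false
      = pvOrd genres plays := by
    rw [hkeys, pvOrd]
    congr 1
    funext c
    rw [hgetD]
  simp only [solution_alt]
  rw [hord, sorted2_eq_sorted_lex]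
  rfl

lemma nodup_ord (genres : List String) (plays : List Int) : (pvOrd genres plays).Nodup :=
  ((PySem.List.sorted_perm _ _ _).nodup_iff).mpr (PySem.Set.nodup_ofList genres)

lemma mem_of_mem_inner (genres : List String) (plays : List Int) (c : String) (i : Int)
    (hi : i ∈ pvInner genres plays c) : pvG genres i = c ∧ i ∈ pvJ genres := by
  rw [pvInner, PySem.List.mem_sorted, pvGrp, List.mem_filter] at hi
  exact ⟨by simpa using hi.2, hi.1⟩

lemma rank_ord_getD (genres : List String) (plays : List Int) (k : Nat)
    (hk : k < (pvOrd genres plays).length) :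
    (pvRank genres plays).getD (pvOrd genres plays)[k] 0 = (k : Int) := by
  rw [pvRank, rank_fold_getD _ (nodup_ord genres plays) 0 _ k hk]
  simp

lemma perm_flatMap (genres : List String) (plays : List Int) :
    ((pvOrd genres plays).flatMap (pvInner genres plays)).Perm (pvJ genres) := by
  rw [List.perm_iff_count]
  intro v
  rw [List.count_flatMap]
  have hcnt : ∀ c, List.count v (pvInner genres plays c)
      = if pvG genres v == c then List.count v (pvJ genres) else 0 := by
    intro c
    rw [pvInner, (PySem.List.sorted_perm _ _ _).count_eq, pvGrp]
    by_cases hc : pvG genres v == c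
    · rw [List.count_filter (by simpa using hc), if_pos hc]
    · rw [if_neg hc]
      refine List.count_eq_zero_of_not_mem (fun hm => ?_)
      exact hc (List.mem_filter.mp hm).2
  by_cases hv : v ∈ pvJ genres
  · have h1 : List.count v (pvJ genres) = 1 := List.count_eq_one_of_mem (nodup_pvJ genres) hv
    rw [List.map_congr_left (fun c _ => by rw [Function.comp_apply, hcnt c, h1]),
        PySem.List.sum_map_ite_one_zero_nat, h1]
    have hmem : pvG genres v ∈ pvOrd genres plays := by
      rw [pvOrd, PySem.List.mem_sorted, PySem.Set.mem_ofList]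
      exact mem_genres_of_mem_pvJ genres v hv
    rw [List.countP_congr (q := fun c => c == pvG genres v)
          (fun c _ => by simp only [beq_iff_eq]; exact eq_comm)]
    exact List.count_eq_one_of_mem (nodup_ord genres plays) hmem
  · rw [List.count_eq_zero_of_not_mem hv]
    refine List.sum_eq_zero (fun x hx => ?_)
    obtain ⟨c, _, rfl⟩ := List.mem_map.mp hx
    rw [Function.comp_apply, hcnt c, List.count_eq_zero_of_not_mem hv]
    simp

lemma pairwise_flatMap_key (genres : List String) (plays : List Int) :
    List.Pairwise (fun a b => pvKey genres plays a < pvKey genres plays b)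
      ((pvOrd genres plays).flatMap (pvInner genres plays)) := by
  rw [List.flatMap_def, List.pairwise_flatten]
  constructor
  · intro l' hl'
    obtain ⟨c, _, rfl⟩ := List.mem_map.mp hl'
    have h1 : List.Pairwise
        (fun a b => toLex ((-(pvP plays a) : Int), a) ≤ toLex ((-(pvP plays b) : Int), b))
        (pvInner genres plays c) :=
      PySem.List.sorted_pairwise (pvGrp genres c) (fun j => toLex ((-(pvP plays j) : Int), j))
    have h2 : (pvInner genres plays c).Nodup :=
      ((PySem.List.sorted_perm _ _ _).nodup_iff).mpr
        ((nodup_pvJ genres).filter (fun j => pvG genres j == c))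
    refine (h1.and h2).imp_of_mem (fun {a b} ha hb hab => ?_)
    have hga := (mem_of_mem_inner genres plays c a ha).1
    have hgb := (mem_of_mem_inner genres plays c b hb).1
    have hlt : toLex ((-(pvP plays a) : Int), a) < toLex ((-(pvP plays b) : Int), b) := by
      refine lt_of_le_of_ne hab.1 (fun he => hab.2 ?_)
      have := congrArg (fun x => (ofLex x).2) he
      simpa using this
    rw [pvKey, pvKey, hga, hgb]
    exact Prod.Lex.toLex_lt_toLex.mpr (Or.inr ⟨rfl, hlt⟩)
  · rw [List.pairwise_map]
    rw [List.pairwise_iff_getElem]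
    intro k l hk hl hkl x hx y hy
    have hgx := (mem_of_mem_inner genres plays _ x hx).1
    have hgy := (mem_of_mem_inner genres plays _ y hy).1
    rw [pvKey, pvKey, hgx, hgy, rank_ord_getD genres plays k hk, rank_ord_getD genres plays l hl]
    exact Prod.Lex.toLex_lt_toLex.mpr (Or.inl (show ((k : Int)) < (l : Int) by exact_mod_cast hkl))

-- ===== VERDICT (by name: the statement is the Claim_ definition above) =====
theorem solution_spec : Claim_equal_solution := by
  intro genres plays _hdom hpre
  show solution genres plays = solution_alt genres plays
  rw [solution_eq_flatMap genres plays, solution_alt_eq genres plays hpre]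
  exact (PySem.List.sorted_eq_of_perm_of_pairwise_lt (pvJ genres) _ (pvKey genres plays)
    (perm_flatMap genres plays) (pairwise_flatMap_key genres plays)).symm
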